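-- pv_equiv track=rewrite | github.com/chrislyons/factory | agents/ig88/scripts/mr_scan_v2.py | get_open_positions
-- ===== SOURCE A (Python) =====
-- def get_open_positions(trades: list) -> dict:
--     open_by_pair = {}
--     for t in trades:
--         if t.get('outcome') == 'open':
--             pair = t.get('pair', '')
--             if pair not in open_by_pair or t.get('entry_timestamp', '') > open_by_pair[pair].get('entry_timestamp', ''):
--                 open_by_pair[pair] = t
--     return open_by_pair
-- ===== SOURCE B (Python) =====
-- def get_open_positions(trades: list) -> dict:
--     groups = {}
--     for t in trades:
--         if t.get('outcome') == 'open':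
--             groups.setdefault(t.get('pair', ''), []).append(t)
--     return {pair: max(ts, key=lambda x: x.get('entry_timestamp', ''))
--             for pair, ts in groups.items()}
-- ===== Notes on version B (the rewrite author's own statement) =====
-- stated objective: alternative
-- what changed: B groups the open trades per pair in one pass and then reduces each group with max(key=entry_timestamp) (first maximal kept, matching A's strict-> update), instead of A's single running-max dict update.
import Mathlib
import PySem

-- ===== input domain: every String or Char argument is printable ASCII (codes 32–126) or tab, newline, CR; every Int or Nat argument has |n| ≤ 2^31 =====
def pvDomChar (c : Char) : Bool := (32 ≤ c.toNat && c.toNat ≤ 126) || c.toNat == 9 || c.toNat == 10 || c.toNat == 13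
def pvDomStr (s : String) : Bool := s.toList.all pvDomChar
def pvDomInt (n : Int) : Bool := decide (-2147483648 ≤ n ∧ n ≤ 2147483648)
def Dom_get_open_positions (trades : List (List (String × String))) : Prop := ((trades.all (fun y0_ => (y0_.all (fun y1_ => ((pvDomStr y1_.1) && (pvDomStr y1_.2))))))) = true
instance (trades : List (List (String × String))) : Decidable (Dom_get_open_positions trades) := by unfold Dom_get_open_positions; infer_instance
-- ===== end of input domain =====

-- B replaces A's single-pass running-max dict with group-by-pair then max(key=entry_timestamp) per group (alternative decomposition, same results).

-- ===== PORT A =====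
-- shared field accessors: t.get('outcome'), t.get('pair',''), t.get('entry_timestamp','') on a trade dict
def pvOutcome (t : List (String × String)) : Option String := (PySem.Dict.mk t).get? "outcome"
def pvPair (t : List (String × String)) : String := (PySem.Dict.mk t).getD "pair" ""
def pvTs (t : List (String × String)) : String := (PySem.Dict.mk t).getD "entry_timestamp" ""

def get_open_positions (trades : List (List (String × String))) : List (String × List (String × String)) :=
  (trades.foldl
    (fun open_by_pair t =>
      if pvOutcome t == some "open" then
        let pair := pvPair t
        if !open_by_pair.contains pair || decide (pvTs (open_by_pair.getD pair []) < pvTs t) then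
          open_by_pair.insert pair t
        else open_by_pair
      else open_by_pair)
    PySem.Dict.empty).items

-- ===== PORT B =====
def get_open_positions_alt (trades : List (List (String × String))) : List (String × List (String × String)) :=
  let groups : PySem.Dict String (List (List (String × String))) :=
    trades.foldl
      (fun g t =>
        if pvOutcome t == some "open" then
          g.modify (pvPair t) [] (fun ts => ts ++ [t])
        else g)
      PySem.Dict.empty
  groups.items.map (fun pv => (pv.1, (PySem.List.max? pv.2 pvTs).getD []))

-- ===== PRECONDITION & SPEC =====
def Spec_get_open_positions (trades : List (List (String × String))) (out : List (String × List (String × String))) : Prop := out = get_open_positions_alt trades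
instance (trades : List (List (String × String))) (out : List (String × List (String × String))) : Decidable (Spec_get_open_positions trades out) := by unfold Spec_get_open_positions; infer_instance

-- ===== CLAIM (what is proved, stated in full; the proofs are below) =====
def Claim_equal_get_open_positions : Prop := ∀ (trades : List (List (String × String))), Dom_get_open_positions trades → Spec_get_open_positions trades (get_open_positions trades)

-- ===== LEMMAS AND PROOFS =====

-- the reduction B applies to every group: first maximal trade by entry_timestamp
def pvPick (ts : List (List (String × String))) : List (String × String) :=
  (PySem.List.max? ts pvTs).getD []

-- apply pvPick to every value of a groups dict
def pvMapDict (g : PySem.Dict String (List (List (String × String)))) :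
    PySem.Dict String (List (String × String)) :=
  PySem.Dict.mk (g.items.map (fun pv => (pv.1, pvPick pv.2)))

lemma pvPick_append (ts : List (List (String × String))) (t : List (String × String)) (h : ts ≠ []) :
    pvPick (ts ++ [t]) = if pvTs (pvPick ts) < pvTs t then t else pvPick ts := by
  cases hm : PySem.List.max? ts pvTs with
  | none => exact absurd ((PySem.List.max?_eq_none_iff ts pvTs).mp hm) h
  | some m =>
    have hm' := hm
    simp only [PySem.List.max?] at hm'
    simp only [pvPick, PySem.List.max?, List.foldl_append, hm', List.foldl_cons, List.foldl_nil]
    by_cases hlt : pvTs m < pvTs t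
    · simp [hlt]
    · simp [hlt]

lemma contains_pvMapDict (g : PySem.Dict String (List (List (String × String)))) (p : String) :
    (pvMapDict g).contains p = g.contains p := by
  simp [pvMapDict, PySem.Dict.contains, List.any_map, Function.comp_def]

lemma find?_pvMapDict (g : PySem.Dict String (List (List (String × String)))) (p : String) :
    (pvMapDict g).items.find? (fun pv => pv.1 == p)
      = (g.items.find? (fun pv => pv.1 == p)).map (fun pv => (pv.1, pvPick pv.2)) := by
  simp [pvMapDict, List.find?_map, Function.comp_def]

lemma getD_of_mem_nodup (l : List (String × List (List (String × String))))
    (pv : String × List (List (String × String))) (hmem : pv ∈ l)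
    (hnd : (l.map Prod.fst).Nodup) :
    l.find? (fun q => q.1 == pv.1) = some pv := by
  induction l with
  | nil => cases hmem
  | cons q rest ih =>
    simp only [List.map_cons, List.nodup_cons] at hnd
    rcases List.mem_cons.mp hmem with h | h
    · subst h
      rw [List.find?_cons_of_pos (by simp)]
    · have hne : q.1 ≠ pv.1 := fun he => hnd.1 (he ▸ List.mem_map.mpr ⟨pv, h, rfl⟩)
      rw [List.find?_cons_of_neg (by simp [hne])]
      exact ih h hnd.2

lemma insert_items_of_contains {ν : Type} (g : PySem.Dict String ν)
    (k : String) (v : ν) (h : g.contains k = true) :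
    (g.insert k v).items = g.items.map (fun pv => if pv.1 == k then (k, v) else pv) := by
  simp [PySem.Dict.insert, h]

lemma insert_items_of_not_contains {ν : Type} (g : PySem.Dict String ν)
    (k : String) (v : ν) (h : g.contains k = false) :
    (g.insert k v).items = g.items ++ [(k, v)] := by
  simp [PySem.Dict.insert, h]

lemma getD_eq_of_find? (g : PySem.Dict String (List (List (String × String))))
    (p : String) (pv : String × List (List (String × String)))
    (h : g.items.find? (fun q => q.1 == p) = some pv) :
    g.getD p [] = pv.2 := by
  simp [PySem.Dict.getD, PySem.Dict.get?, h]

lemma step_comm (g : PySem.Dict String (List (List (String × String))))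
    (t : List (String × String))
    (hnd : (g.items.map Prod.fst).Nodup)
    (hne : ∀ pv ∈ g.items, pv.2 ≠ ([] : List (List (String × String)))) :
    (if pvOutcome t == some "open" then
        let pair := pvPair t
        if !(pvMapDict g).contains pair || decide (pvTs ((pvMapDict g).getD pair []) < pvTs t) then
          (pvMapDict g).insert pair t
        else pvMapDict g
      else pvMapDict g)
    = pvMapDict (if pvOutcome t == some "open" then
        g.modify (pvPair t) [] (fun ts => ts ++ [t]) else g) := by
  by_cases ho : (pvOutcome t == some "open") = true
  · simp only [ho, if_pos]
    by_cases hc : g.contains (pvPair t) = true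
    · -- pair already present: g has a unique entry (pvPair t, ts), ts ≠ []
      obtain ⟨pv0, hf⟩ : ∃ pv0, g.items.find? (fun q => q.1 == pvPair t) = some pv0 := by
        simp only [PySem.Dict.contains, List.any_eq_true] at hc
        obtain ⟨x, hx, hxp⟩ := hc
        cases hfind : g.items.find? (fun q => q.1 == pvPair t) with
        | none => exact absurd hxp (by simpa using List.find?_eq_none.mp hfind x hx)
        | some pv0 => exact ⟨pv0, rfl⟩
      have hpv0mem : pv0 ∈ g.items := List.mem_of_find?_eq_some hf
      have hpv0k : pv0.1 = pvPair t := by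
        have := List.find?_some hf; simpa [beq_iff_eq] using this
      have hts : g.getD (pvPair t) [] = pv0.2 := getD_eq_of_find? g _ pv0 hf
      have htsne : pv0.2 ≠ [] := hne pv0 hpv0mem
      have hgetmap : (pvMapDict g).getD (pvPair t) [] = pvPick pv0.2 := by
        simp [PySem.Dict.getD, PySem.Dict.get?, find?_pvMapDict, hf]
      have hcmap : (pvMapDict g).contains (pvPair t) = true := by
        rw [contains_pvMapDict]; exact hc
      have hmodify : g.modify (pvPair t) [] (fun ts => ts ++ [t])
          = g.insert (pvPair t) (pv0.2 ++ [t]) := by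
        simp [PySem.Dict.modify, hts]
      -- every entry of g matching the pair key IS pv0 (keys are nodup)
      have huniq : ∀ pv ∈ g.items, pv.1 = pvPair t → pv = pv0 := by
        intro pv hpvmem hpvk
        have h1 : g.items.find? (fun q => q.1 == pv.1) = some pv := getD_of_mem_nodup _ pv hpvmem hnd
        have h2 : g.items.find? (fun q => q.1 == pv.1) = some pv0 := by rw [hpvk]; exact hf
        exact Option.some_injective _ (h1.symm.trans h2)
      rw [hmodify, hgetmap, hcmap]
      by_cases hlt : pvTs (pvPick pv0.2) < pvTs t
      · -- A overwrites with t; B's group max of (ts ++ [t]) is t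
        rw [if_pos (by simp [hlt])]
        apply PySem.Dict.ext
        rw [insert_items_of_contains _ _ _ hcmap]
        unfold pvMapDict
        rw [insert_items_of_contains _ _ _ hc]
        simp only [List.map_map]
        apply List.map_congr_left
        intro pv hpvmem
        by_cases hk : pv.1 = pvPair t
        · rw [huniq pv hpvmem hk]
          simp [hpv0k, pvPick_append _ _ htsne, hlt]
        · simp [hk]
      · -- A keeps the old trade; B's group max is unchanged by the append
        rw [if_neg (by simp [hlt])]
        apply PySem.Dict.ext
        unfold pvMapDict
        rw [insert_items_of_contains _ _ _ hc]
        simp only [List.map_map]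
        symm
        apply List.map_congr_left
        intro pv hpvmem
        by_cases hk : pv.1 = pvPair t
        · rw [huniq pv hpvmem hk]
          simp [hpv0k, pvPick_append _ _ htsne, hlt]
        · simp [hk]
    · -- new pair: both append at the end
      have hc' : g.contains (pvPair t) = false := by simpa using hc
      have hcmap : (pvMapDict g).contains (pvPair t) = false := by
        rw [contains_pvMapDict]; exact hc'
      have hget0 : g.getD (pvPair t) [] = [] := by
        have hfind : g.items.find? (fun q => q.1 == pvPair t) = none := by
          rw [List.find?_eq_none]
          intro x hx hb
          have hcon : g.contains (pvPair t) = true := by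
            simp only [PySem.Dict.contains, List.any_eq_true]
            exact ⟨x, hx, hb⟩
          rw [hcon] at hc'
          cases hc'
        simp [PySem.Dict.getD, PySem.Dict.get?, hfind]
      have hmodify : g.modify (pvPair t) [] (fun ts => ts ++ [t])
          = g.insert (pvPair t) [t] := by
        simp [PySem.Dict.modify, hget0]
      rw [if_pos (by simp [hcmap]), hmodify]
      apply PySem.Dict.ext
      rw [insert_items_of_not_contains _ _ _ hcmap]
      unfold pvMapDict
      rw [insert_items_of_not_contains _ _ _ hc']
      simp [pvPick, PySem.List.max?]
  · simp only [Bool.not_eq_true] at ho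
    simp [ho]

lemma stepB_nodup (g : PySem.Dict String (List (List (String × String))))
    (t : List (String × String)) (hnd : (g.items.map Prod.fst).Nodup) :
    (((if pvOutcome t == some "open" then
        g.modify (pvPair t) [] (fun ts => ts ++ [t]) else g)).items.map Prod.fst).Nodup := by
  split
  · simp only [PySem.Dict.modify]
    by_cases hc : g.contains (pvPair t) = true
    · rw [insert_items_of_contains _ _ _ hc]
      have hmap : (g.items.map (fun pv => if pv.1 == pvPair t then (pvPair t, g.getD (pvPair t) [] ++ [t]) else pv)).map Prod.fst = g.items.map Prod.fst := by
        rw [List.map_map]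
        apply List.map_congr_left
        intro pv _
        by_cases hk : pv.1 = pvPair t
        · simp [hk]
        · simp [hk]
      rw [hmap]; exact hnd
    · rw [insert_items_of_not_contains _ _ _ (by simpa using hc)]
      rw [List.map_append, List.nodup_append]
      refine ⟨hnd, by simp, ?_⟩
      intro x hx y hy heq
      obtain ⟨pv, hpv, hfst⟩ := List.mem_map.mp hx
      have hy' : y = pvPair t := by simpa using hy
      have hcon : g.contains (pvPair t) = true := by
        simp only [PySem.Dict.contains, List.any_eq_true]
        exact ⟨pv, hpv, by simp [hfst, heq, hy']⟩
      simp [hcon] at hc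
  · exact hnd

lemma stepB_ne (g : PySem.Dict String (List (List (String × String))))
    (t : List (String × String))
    (hne : ∀ pv ∈ g.items, pv.2 ≠ ([] : List (List (String × String)))) :
    ∀ pv ∈ ((if pvOutcome t == some "open" then
        g.modify (pvPair t) [] (fun ts => ts ++ [t]) else g)).items,
      pv.2 ≠ ([] : List (List (String × String))) := by
  split
  · intro pv hpv
    simp only [PySem.Dict.modify, PySem.Dict.insert] at hpv
    split at hpv
    · simp only [List.mem_map] at hpv
      obtain ⟨q, hq, hqe⟩ := hpv
      subst hqe
      split
      · simp
      · exact hne q hq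
    · simp only [List.mem_append, List.mem_singleton] at hpv
      rcases hpv with h | h
      · exact hne pv h
      · subst h; simp
  · exact hne

lemma fold_comm (trades : List (List (String × String)))
    (g : PySem.Dict String (List (List (String × String))))
    (hnd : (g.items.map Prod.fst).Nodup)
    (hne : ∀ pv ∈ g.items, pv.2 ≠ ([] : List (List (String × String)))) :
    trades.foldl
      (fun open_by_pair t =>
        if pvOutcome t == some "open" then
          let pair := pvPair t
          if !open_by_pair.contains pair || decide (pvTs (open_by_pair.getD pair []) < pvTs t) then
            open_by_pair.insert pair t
          else open_by_pair
        else open_by_pair)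
      (pvMapDict g)
    = pvMapDict (trades.foldl
        (fun g t =>
          if pvOutcome t == some "open" then
            g.modify (pvPair t) [] (fun ts => ts ++ [t])
          else g) g) := by
  induction trades generalizing g with
  | nil => rfl
  | cons t rest ih =>
    simp only [List.foldl_cons]
    rw [step_comm g t hnd hne]
    exact ih _ (stepB_nodup g t hnd) (stepB_ne g t hne)

-- ===== VERDICT (by name: the statement is the Claim_ definition above) =====
theorem get_open_positions_spec : Claim_equal_get_open_positions := by
  intro trades _
  show get_open_positions trades = get_open_positions_alt trades
  unfold get_open_positions get_open_positions_alt
  have h := fold_comm trades PySem.Dict.empty (by simp [PySem.Dict.empty]) (by simp [PySem.Dict.empty])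
  have he : pvMapDict PySem.Dict.empty = PySem.Dict.empty := rfl
  rw [he] at h
  rw [h]
  rfl
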